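-- pv_equiv track=rewrite | github.com/RealAsmaAljneibi/poetry | src/data/labels.py | merge_genre_label
-- ===== SOURCE A (Python) =====
-- GENRE_MERGE_MAP: dict[str, str] = {
--     "Madih (Praise)": "Fakhr (Pride & Honor)",
--     "I'tithar (Delicate Apology)": "Ghazal (Delicate love)",
--     "Tareef (Humorous)": "Hija (Satire & Social Critique)",
-- }
--
-- def merge_genre_label(genre_str: str) -> str:
--     """Returns the canonical (post-merge) genre string for a raw genre_en value."""
--     genre_str = genre_str.strip()
--     for old, new in GENRE_MERGE_MAP.items():
--         if (
--             genre_str.lower() == old.lower()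
--             or genre_str.lower().split(" ")[0] == old.lower().split(" ")[0]
--         ):
--             return new
--     return genre_str
-- ===== SOURCE B (Python) =====
-- GENRE_MERGE_MAP: dict[str, str] = {
--     "Madih (Praise)": "Fakhr (Pride & Honor)",
--     "I'tithar (Delicate Apology)": "Ghazal (Delicate love)",
--     "Tareef (Humorous)": "Hija (Satire & Social Critique)",
-- }
--
-- # First lowercased word of each key -> replacement; built once.
-- _FIRST_WORD_MAP = {old.lower().split(" ")[0]: new for old, new in GENRE_MERGE_MAP.items()}
--
-- def merge_genre_label(genre_str: str) -> str:
--     """Returns the canonical (post-merge) genre string for a raw genre_en value."""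
--     genre_str = genre_str.strip()
--     return _FIRST_WORD_MAP.get(genre_str.lower().split(" ")[0], genre_str)
-- ===== Notes on version B (the rewrite author's own statement) =====
-- stated objective: simpler
-- what changed: Replaced the loop over GENRE_MERGE_MAP with a precomputed dictionary keyed by each key's first lowercased word (full-string equality implies first-word equality for these keys), so the function is a single dict lookup with the stripped string as default.
import Mathlib
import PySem

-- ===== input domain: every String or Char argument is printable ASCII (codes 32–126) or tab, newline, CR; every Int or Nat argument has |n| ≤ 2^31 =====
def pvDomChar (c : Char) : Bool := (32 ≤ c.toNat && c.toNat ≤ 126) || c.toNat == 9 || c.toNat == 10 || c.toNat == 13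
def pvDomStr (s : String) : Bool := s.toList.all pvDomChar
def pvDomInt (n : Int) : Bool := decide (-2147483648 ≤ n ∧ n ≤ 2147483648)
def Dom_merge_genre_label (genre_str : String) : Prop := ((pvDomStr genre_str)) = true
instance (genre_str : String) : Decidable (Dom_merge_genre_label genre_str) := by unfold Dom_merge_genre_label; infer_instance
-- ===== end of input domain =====

-- B replaces A's loop over GENRE_MERGE_MAP by a precomputed first-lowercased-word lookup table (simpler).

-- ===== PORT A =====
def GENRE_MERGE_MAP : PySem.Dict String String :=
  PySem.Dict.ofList
    [("Madih (Praise)", "Fakhr (Pride & Honor)"),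
     ("I'tithar (Delicate Apology)", "Ghazal (Delicate love)"),
     ("Tareef (Humorous)", "Hija (Satire & Social Critique)")]

-- s.lower().split(" ")[0]; split(" ") on any string is nonempty, so [0] never raises (headD "" is exact here)
def pyFirstLowerWord (s : String) : String :=
  String.ofList ((PySem.Chars.splitOn (PySem.Chars.lower s.toList) " ".toList).headD [])

-- the for-loop over GENRE_MERGE_MAP.items()
def genreLoop (g : String) : List (String × String) → String
  | [] => g
  | (old, new) :: rest =>
    if (PySem.Str.lower g == PySem.Str.lower old)
        || (pyFirstLowerWord g == pyFirstLowerWord old) then new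
    else genreLoop g rest

def merge_genre_label (genre_str : String) : String :=
  genreLoop (PySem.Str.strip genre_str) GENRE_MERGE_MAP.items

-- ===== PORT B =====
-- _FIRST_WORD_MAP, built once from GENRE_MERGE_MAP
def FIRST_WORD_MAP : PySem.Dict String String :=
  PySem.Dict.ofList (GENRE_MERGE_MAP.items.map (fun p => (pyFirstLowerWord p.1, p.2)))

def merge_genre_label_alt (genre_str : String) : String :=
  let g := PySem.Str.strip genre_str
  PySem.Dict.getD FIRST_WORD_MAP (pyFirstLowerWord g) g

-- ===== PRECONDITION & SPEC =====
def Spec_merge_genre_label (genre_str : String) (out : String) : Prop := out = merge_genre_label_alt genre_str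
instance (genre_str : String) (out : String) : Decidable (Spec_merge_genre_label genre_str out) := by unfold Spec_merge_genre_label; infer_instance

-- ===== CLAIM (what is proved, stated in full; the proofs are below) =====
def Claim_equal_merge_genre_label : Prop := ∀ (genre_str : String), Dom_merge_genre_label genre_str → Spec_merge_genre_label genre_str (merge_genre_label genre_str)

-- ===== LEMMAS AND PROOFS =====

-- lowered-string equality implies first-lowered-word equality, so the disjunction collapses
theorem orFirst (g c : String) :
    ((PySem.Str.lower g == PySem.Str.lower c) || (pyFirstLowerWord g == pyFirstLowerWord c))
      = (pyFirstLowerWord g == pyFirstLowerWord c) := by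
  by_cases h : PySem.Str.lower g = PySem.Str.lower c
  · have hl : PySem.Chars.lower g.toList = PySem.Chars.lower c.toList := by
      have := congrArg String.toList h
      simpa [PySem.Str.toList_lower] using this
    have : pyFirstLowerWord g = pyFirstLowerWord c := by
      unfold pyFirstLowerWord; rw [hl]
    simp [h, this]
  · simp [h]

theorem core (g : String) :
    genreLoop g GENRE_MERGE_MAP.items
      = PySem.Dict.getD FIRST_WORD_MAP (pyFirstLowerWord g) g := by
  have e1 : pyFirstLowerWord "Madih (Praise)" = "madih" := by decide
  have e2 : pyFirstLowerWord "I'tithar (Delicate Apology)" = "i'tithar" := by decide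
  have e3 : pyFirstLowerWord "Tareef (Humorous)" = "tareef" := by decide
  show genreLoop g [("Madih (Praise)", "Fakhr (Pride & Honor)"),
     ("I'tithar (Delicate Apology)", "Ghazal (Delicate love)"),
     ("Tareef (Humorous)", "Hija (Satire & Social Critique)")] = _
  simp only [genreLoop, orFirst]
  simp only [e1, e2, e3]
  have hF : FIRST_WORD_MAP = PySem.Dict.mk
      [("madih", "Fakhr (Pride & Honor)"),
       ("i'tithar", "Ghazal (Delicate love)"),
       ("tareef", "Hija (Satire & Social Critique)")] := by decide
  rw [hF]
  simp only [PySem.Dict.getD, PySem.Dict.get?_mk_cons]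
  by_cases h1 : pyFirstLowerWord g = "madih"
  · simp [h1]
  · by_cases h2 : pyFirstLowerWord g = "i'tithar"
    · simp [h2]
    · by_cases h3 : pyFirstLowerWord g = "tareef"
      · simp [h3]
      · simp [h1, h2, h3, Ne.symm h1, Ne.symm h2, Ne.symm h3, PySem.Dict.get?]

-- ===== VERDICT (by name: the statement is the Claim_ definition above) =====
theorem merge_genre_label_spec : Claim_equal_merge_genre_label := by
  intro s _
  show merge_genre_label s = merge_genre_label_alt s
  unfold merge_genre_label merge_genre_label_alt
  exact core (PySem.Str.strip s)
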